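-- pv_equiv track=rewrite | github.com/Angelopvtac/AgentOrg | scripts/enable-channel.py | find_commented_channel_block
-- ===== SOURCE A (Python) =====
-- def find_commented_channel_block(text):
--     """Find the start and end of the commented channel block including header comment."""
--     lines = text.split("\n")
--     start = None
--     end = None
--     brace_depth = 0
--     in_block = False
--
--     for i, line in enumerate(lines):
--         stripped = line.strip()
--
--         # Find the header comment line
--         if start is None and "Channel Templates" in stripped and stripped.startswith("//"):
--             start = i
--             continue
--
--         # Find the opening "channels": {
--         if start is not None and not in_block:
--             if '"channels"' in stripped and stripped.startswith("//"):
--                 # Count braces from this line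
--                 uncommented = stripped.lstrip("/ ")
--                 brace_depth += uncommented.count("{") - uncommented.count("}")
--                 in_block = True
--                 continue
--
--         # Track braces to find the end
--         if in_block:
--             uncommented = stripped.lstrip("/ ")
--             brace_depth += uncommented.count("{") - uncommented.count("}")
--             if brace_depth <= 0:
--                 end = i
--                 break
--
--     return start, end
-- ===== SOURCE B (Python) =====
-- def find_commented_channel_block(text):
--     """Find the start and end of the commented channel block including header comment."""
--     stripped = [l.strip() for l in text.split("\n")]
--
--     # table of candidate indices, built once
--     headers = [i for i, s in enumerate(stripped)
--                if "Channel Templates" in s and s.startswith("//")]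
--     if not headers:
--         return None, None
--     start = headers[0]
--
--     chans = [j for j, s in enumerate(stripped)
--              if start < j and '"channels"' in s and s.startswith("//")]
--     if not chans:
--         return start, None
--     ch = chans[0]
--
--     # prefix sums of brace deltas: prefix[m] = net braces in the first m lines
--     prefix = [0]
--     for s in stripped:
--         u = s.lstrip("/ ")
--         prefix.append(prefix[-1] + u.count("{") - u.count("}"))
--
--     ends = [k for k in range(ch + 1, len(stripped)) if prefix[k + 1] <= prefix[ch]]
--     end = ends[0] if ends else None
--     return start, end
-- ===== Notes on version B (the rewrite author's own statement) =====
-- stated objective: alternative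
-- what changed: Replaces A's single flag-driven loop with running (start, in_block, brace_depth) state by tables built once over the stripped lines: candidate index lists for the header and channels lines, and a prefix-sum array of brace deltas, so the block end is the first index whose prefix sum drops back to the level at the channels line instead of a running depth accumulator.
import Mathlib
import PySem

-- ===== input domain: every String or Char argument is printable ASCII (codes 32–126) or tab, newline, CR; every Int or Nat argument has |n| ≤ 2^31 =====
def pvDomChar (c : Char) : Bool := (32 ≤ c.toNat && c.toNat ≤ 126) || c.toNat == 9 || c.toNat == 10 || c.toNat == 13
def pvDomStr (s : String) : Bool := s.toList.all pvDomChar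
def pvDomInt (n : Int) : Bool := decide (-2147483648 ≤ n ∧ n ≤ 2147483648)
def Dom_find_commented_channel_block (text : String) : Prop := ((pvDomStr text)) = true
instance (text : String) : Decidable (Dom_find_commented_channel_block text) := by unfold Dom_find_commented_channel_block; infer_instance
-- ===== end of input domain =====

-- B replaces A's single flag-driven stateful loop by tables built once over the stripped
-- lines — candidate index lists and a prefix-sum array of brace deltas — so the end of the
-- block is found by a pure arithmetic condition on prefix sums instead of a running depth
-- accumulator; objective: alternative (same cost, table-driven instead of stateful).

-- ===== PORT A =====
-- A's single loop over enumerate(lines) with state (start, end, brace_depth, in_block);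
-- 'lstrip("/ ")' is ported exactly as dropWhile on the character set {'/', ' '}.
def pvA_loop : List (List Char) → Nat → Option Int → Int → Bool → Option Int × Option Int
  | [], _, start, _, _ => (start, none)
  | line :: rest, i, start, depth, inBlock =>
    let stripped := PySem.Chars.strip line
    if start = none ∧ PySem.Chars.isIn "Channel Templates".toList stripped = true ∧
        PySem.Chars.startswith stripped "//".toList = true then
      pvA_loop rest (i + 1) (some (i : Int)) depth inBlock
    else if start ≠ none ∧ inBlock = false ∧ PySem.Chars.isIn "\"channels\"".toList stripped = true ∧
        PySem.Chars.startswith stripped "//".toList = true then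
      let uncommented := stripped.dropWhile (fun c => c == '/' || c == ' ')
      pvA_loop rest (i + 1) start
        (depth + (PySem.Chars.count uncommented ['{'] : Int) - (PySem.Chars.count uncommented ['}'] : Int)) true
    else if inBlock = true then
      let uncommented := stripped.dropWhile (fun c => c == '/' || c == ' ')
      let d := depth + (PySem.Chars.count uncommented ['{'] : Int) - (PySem.Chars.count uncommented ['}'] : Int)
      if d ≤ 0 then (start, some (i : Int)) else pvA_loop rest (i + 1) start d true
    else
      pvA_loop rest (i + 1) start depth inBlock

def find_commented_channel_block (text : String) : Option Int × Option Int :=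
  pvA_loop (PySem.Chars.splitOn text.toList "\n".toList) 0 none 0 false

-- ===== PORT B =====
def pvIsHeaderS (s : List Char) : Bool :=
  PySem.Chars.isIn "Channel Templates".toList s && PySem.Chars.startswith s "//".toList

def pvIsChannelsS (s : List Char) : Bool :=
  PySem.Chars.isIn "\"channels\"".toList s && PySem.Chars.startswith s "//".toList

-- s.lstrip("/ ").count("{") - s.lstrip("/ ").count("}") on an already-stripped line
def pvDeltaS (s : List Char) : Int :=
  let u := s.dropWhile (fun c => c == '/' || c == ' ')
  (PySem.Chars.count u ['{'] : Int) - (PySem.Chars.count u ['}'] : Int)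

-- [i for i, s in enumerate(xs) if p i s]  (started with i = 0)
def pvIdxWhere (p : Nat → List Char → Bool) : List (List Char) → Nat → List Nat
  | [], _ => []
  | s :: ss, i => if p i s then i :: pvIdxWhere p ss (i + 1) else pvIdxWhere p ss (i + 1)

-- the loop 'prefix.append(prefix[-1] + ...)': running sums of pvDeltaS, seeded with a
def pvPrefixAux : List (List Char) → Int → List Int
  | [], _ => []
  | s :: ss, a => (a + pvDeltaS s) :: pvPrefixAux ss (a + pvDeltaS s)

-- prefix[k]: every use in B is in range, so getD is exact
def pvAt (xs : List Int) (k : Nat) : Int := xs.getD k 0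

def find_commented_channel_block_alt (text : String) : Option Int × Option Int :=
  let stripped := (PySem.Chars.splitOn text.toList "\n".toList).map PySem.Chars.strip
  match (pvIdxWhere (fun _ s => pvIsHeaderS s) stripped 0).head? with
  | none => (none, none)
  | some start =>
    match (pvIdxWhere (fun j s => decide (start < j) && pvIsChannelsS s) stripped 0).head? with
    | none => (some (start : Int), none)
    | some ch =>
      let pref := 0 :: pvPrefixAux stripped 0
      let ends := (PySem.List.pyRange ((ch : Int) + 1) (stripped.length : Int) 1).filter
        (fun k => decide (pvAt pref (k.toNat + 1) ≤ pvAt pref ch))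
      (some (start : Int), ends.head?)

-- ===== PRECONDITION & SPEC =====
def Spec_find_commented_channel_block (text : String) (out : Option Int × Option Int) : Prop := out = find_commented_channel_block_alt text
instance (text : String) (out : Option Int × Option Int) : Decidable (Spec_find_commented_channel_block text out) := by unfold Spec_find_commented_channel_block; infer_instance

-- ===== CLAIM =====
def Claim_equal_find_commented_channel_block : Prop := ∀ (text : String), Dom_find_commented_channel_block text → Spec_find_commented_channel_block text (find_commented_channel_block text)

-- ===== LEMMAS AND PROOFS =====

-- A's loop re-expressed on the list of stripped lines (strip is applied once up front)
def pvA_loopS : List (List Char) → Nat → Option Int → Int → Bool → Option Int × Option Int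
  | [], _, start, _, _ => (start, none)
  | s :: rest, i, start, depth, inBlock =>
    if start = none ∧ PySem.Chars.isIn "Channel Templates".toList s = true ∧
        PySem.Chars.startswith s "//".toList = true then
      pvA_loopS rest (i + 1) (some (i : Int)) depth inBlock
    else if start ≠ none ∧ inBlock = false ∧ PySem.Chars.isIn "\"channels\"".toList s = true ∧
        PySem.Chars.startswith s "//".toList = true then
      let u := s.dropWhile (fun c => c == '/' || c == ' ')
      pvA_loopS rest (i + 1) start
        (depth + (PySem.Chars.count u ['{'] : Int) - (PySem.Chars.count u ['}'] : Int)) true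
    else if inBlock = true then
      let u := s.dropWhile (fun c => c == '/' || c == ' ')
      let d := depth + (PySem.Chars.count u ['{'] : Int) - (PySem.Chars.count u ['}'] : Int)
      if d ≤ 0 then (start, some (i : Int)) else pvA_loopS rest (i + 1) start d true
    else
      pvA_loopS rest (i + 1) start depth inBlock

theorem pvA_loop_strip (ls : List (List Char)) (i : Nat) (st : Option Int) (d : Int) (b : Bool) :
    pvA_loop ls i st d b = pvA_loopS (ls.map PySem.Chars.strip) i st d b := by
  induction ls generalizing i st d b with
  | nil => rfl
  | cons l ls ih =>
    simp only [List.map, pvA_loop, pvA_loopS]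
    split_ifs <;> simp [ih]

-- staged scans over the stripped lines (proof-side characterisation of A's phases)
def pvScanHeaderS : List (List Char) → Nat → Option (Nat × List (List Char))
  | [], _ => none
  | s :: ss, i => if pvIsHeaderS s then some (i, ss) else pvScanHeaderS ss (i + 1)

def pvScanChannelsS : List (List Char) → Nat → Option (Nat × List Char × List (List Char))
  | [], _ => none
  | s :: ss, i => if pvIsChannelsS s then some (i, s, ss) else pvScanChannelsS ss (i + 1)

def pvScanEndS : List (List Char) → Nat → Int → Option Nat
  | [], _, _ => none
  | s :: ss, i, d =>
    let d' := d + pvDeltaS s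
    if d' ≤ 0 then some i else pvScanEndS ss (i + 1) d'

-- Phase 0 of A's loop (start not yet found) is the header scan.
theorem pvA_phase0 (ls : List (List Char)) (i : Nat) :
    pvA_loopS ls i none 0 false =
      match pvScanHeaderS ls i with
      | none => (none, none)
      | some (s, rest) => pvA_loopS rest (s + 1) (some (s : Int)) 0 false := by
  induction ls generalizing i with
  | nil => simp [pvA_loopS, pvScanHeaderS]
  | cons l ls ih =>
    by_cases h : pvIsHeaderS l = true
    · have h1 : PySem.Chars.isIn "Channel Templates".toList l = true ∧
          PySem.Chars.startswith l "//".toList = true := by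
        simpa [pvIsHeaderS] using h
      have hs : pvScanHeaderS (l :: ls) i = some (i, ls) := by simp [pvScanHeaderS, h]
      rw [hs]
      simp only [pvA_loopS]
      rw [if_pos ⟨trivial, h1.1, h1.2⟩]
    · have h1 : ¬ (PySem.Chars.isIn "Channel Templates".toList l = true ∧
          PySem.Chars.startswith l "//".toList = true) := by
        simpa [pvIsHeaderS] using h
      simp only [pvA_loopS, pvScanHeaderS, if_neg h]
      rw [if_neg (by tauto), if_neg (by simp), if_neg (by simp)]
      exact ih (i + 1)

-- Phase 1 (start found, not yet in the block) is the channels scan.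
theorem pvA_phase1 (ls : List (List Char)) (i : Nat) (s : Int) :
    pvA_loopS ls i (some s) 0 false =
      match pvScanChannelsS ls i with
      | none => (some s, none)
      | some (j, l, rest) => pvA_loopS rest (j + 1) (some s) (pvDeltaS l) true := by
  induction ls generalizing i with
  | nil => simp [pvA_loopS, pvScanChannelsS]
  | cons l ls ih =>
    by_cases h : pvIsChannelsS l = true
    · have h1 : PySem.Chars.isIn "\"channels\"".toList l = true ∧
          PySem.Chars.startswith l "//".toList = true := by
        simpa [pvIsChannelsS] using h
      have hs : pvScanChannelsS (l :: ls) i = some (i, l, ls) := by simp [pvScanChannelsS, h]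
      rw [hs]
      simp only [pvA_loopS]
      rw [if_neg (by simp), if_pos ⟨by simp, trivial, h1.1, h1.2⟩]
      have h2 : (0 : Int)
          + (PySem.Chars.count (List.dropWhile (fun c => c == '/' || c == ' ') l) ['{'] : Int)
          - (PySem.Chars.count (List.dropWhile (fun c => c == '/' || c == ' ') l) ['}'] : Int)
          = pvDeltaS l := by simp only [pvDeltaS]; ring
      rw [h2]
    · have h1 : ¬ (PySem.Chars.isIn "\"channels\"".toList l = true ∧
          PySem.Chars.startswith l "//".toList = true) := by
        simpa [pvIsChannelsS] using h
      simp only [pvA_loopS, pvScanChannelsS, if_neg h]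
      rw [if_neg (by simp), if_neg (by tauto), if_neg (by simp)]
      exact ih (i + 1)

-- Phase 2 (inside the block) is the brace-tracking scan.
theorem pvA_phase2 (ls : List (List Char)) (i : Nat) (s d : Int) :
    pvA_loopS ls i (some s) d true =
      match pvScanEndS ls i d with
      | none => (some s, none)
      | some e => (some s, some (e : Int)) := by
  induction ls generalizing i d with
  | nil => simp [pvA_loopS, pvScanEndS]
  | cons l ls ih =>
    have harith : ∀ dd : Int,
        dd + (PySem.Chars.count (List.dropWhile (fun c => c == '/' || c == ' ') l) ['{'] : Int)
           - (PySem.Chars.count (List.dropWhile (fun c => c == '/' || c == ' ') l) ['}'] : Int)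
          = dd + pvDeltaS l := by
      intro dd; simp only [pvDeltaS]; ring
    simp only [pvA_loopS, pvScanEndS, if_true]
    rw [if_neg (by simp), if_neg (by simp), harith]
    by_cases hd : d + pvDeltaS l ≤ 0
    · rw [if_pos hd, if_pos hd]
    · rw [if_neg hd, if_neg hd]
      exact ih (i + 1) (d + pvDeltaS l)

-- B's header index list picks the same first index as the header scan.
theorem pvIdxWhere_header (S : List (List Char)) (i : Nat) :
    (pvIdxWhere (fun _ s => pvIsHeaderS s) S i).head? = (pvScanHeaderS S i).map Prod.fst := by
  induction S generalizing i with
  | nil => rfl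
  | cons s ss ih =>
    by_cases h : pvIsHeaderS s = true
    · simp [pvIdxWhere, pvScanHeaderS, h]
    · simp only [pvIdxWhere, pvScanHeaderS, if_neg h]
      exact ih (i + 1)

theorem pvIdxWhere_channels (S : List (List Char)) (i : Nat) :
    (pvIdxWhere (fun _ s => pvIsChannelsS s) S i).head? = (pvScanChannelsS S i).map Prod.fst := by
  induction S generalizing i with
  | nil => rfl
  | cons s ss ih =>
    by_cases h : pvIsChannelsS s = true
    · simp [pvIdxWhere, pvScanChannelsS, h]
    · simp only [pvIdxWhere, pvScanChannelsS, if_neg h]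
      exact ih (i + 1)

-- The guard 'start < j' skips exactly the first start+1 lines.
theorem pvIdxWhere_guard_true (S : List (List Char)) (st : Nat) (i : Nat) (hi : st < i) :
    pvIdxWhere (fun j s => decide (st < j) && pvIsChannelsS s) S i
      = pvIdxWhere (fun _ s => pvIsChannelsS s) S i := by
  induction S generalizing i with
  | nil => rfl
  | cons s ss ih =>
    simp only [pvIdxWhere, decide_eq_true hi, Bool.true_and]
    rw [ih (i + 1) (by omega)]

theorem pvIdxWhere_guard_skip (S : List (List Char)) (st : Nat) (i : Nat) (hi : i ≤ st + 1) :
    (pvIdxWhere (fun j s => decide (st < j) && pvIsChannelsS s) S i).head?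
      = (pvIdxWhere (fun _ s => pvIsChannelsS s) (S.drop (st + 1 - i)) (st + 1)).head? := by
  induction S generalizing i with
  | nil => simp [pvIdxWhere]
  | cons s ss ih =>
    rcases Nat.lt_or_ge i (st + 1) with hlt | hge
    · have hni : ¬ st < i := by omega
      have h0 : (decide (st < i) && pvIsChannelsS s) = false := by simp [hni]
      simp only [pvIdxWhere, h0, Bool.false_eq_true, if_neg not_false]
      rw [ih (i + 1) (by omega)]
      have : st + 1 - i = (st + 1 - (i + 1)) + 1 := by omega
      rw [this, List.drop_succ_cons]
    · have hie : i = st + 1 := by omega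
      subst hie
      rw [pvIdxWhere_guard_true _ _ _ (by omega)]
      simp

-- a successful header scan locates the drop point
theorem pvScanHeaderS_drop (S : List (List Char)) (i s : Nat) (rest : List (List Char))
    (h : pvScanHeaderS S i = some (s, rest)) : i ≤ s ∧ S.drop (s + 1 - i) = rest := by
  induction S generalizing i with
  | nil => simp [pvScanHeaderS] at h
  | cons l ls ih =>
    by_cases hl : pvIsHeaderS l = true
    · simp [pvScanHeaderS, hl] at h
      obtain ⟨h1, h2⟩ := h
      subst h1; subst h2
      exact ⟨le_refl _, by simp⟩
    · simp only [pvScanHeaderS, if_neg hl] at h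
      obtain ⟨h1, h2⟩ := ih (i + 1) h
      refine ⟨by omega, ?_⟩
      have : s + 1 - i = (s + 1 - (i + 1)) + 1 := by omega
      rw [this, List.drop_succ_cons, h2]

theorem pvScanChannelsS_drop (S : List (List Char)) (i j : Nat) (l : List Char)
    (rest : List (List Char)) (h : pvScanChannelsS S i = some (j, l, rest)) :
    i ≤ j ∧ S.drop (j - i) = l :: rest := by
  induction S generalizing i with
  | nil => simp [pvScanChannelsS] at h
  | cons t ts ih =>
    by_cases hl : pvIsChannelsS t = true
    · simp [pvScanChannelsS, hl] at h
      obtain ⟨h1, h2, h3⟩ := h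
      subst h1; subst h2; subst h3
      exact ⟨le_refl _, by simp⟩
    · simp only [pvScanChannelsS, if_neg hl] at h
      obtain ⟨h1, h2⟩ := ih (i + 1) h
      refine ⟨by omega, ?_⟩
      have : j - i = (j - (i + 1)) + 1 := by omega
      rw [this, List.drop_succ_cons, h2]

-- prefix sums: (pvPrefixAux S a).getD m = a + sum of the first m+1 deltas
theorem pvPrefixAux_getD (S : List (List Char)) (a : Int) (m : Nat) (hm : m < S.length) :
    (pvPrefixAux S a).getD m 0 = a + ((S.map pvDeltaS).take (m + 1)).sum := by
  induction S generalizing a m with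
  | nil => simp at hm
  | cons s ss ih =>
    cases m with
    | zero => simp [pvPrefixAux]
    | succ m' =>
      simp only [pvPrefixAux, List.getD_cons_succ]
      rw [ih (a + pvDeltaS s) m' (by simpa using hm)]
      simp [List.take_succ_cons]
      ring

theorem pvAt_prefix (S : List (List Char)) (m : Nat) (hm : m ≤ S.length) :
    pvAt (0 :: pvPrefixAux S 0) m = ((S.map pvDeltaS).take m).sum := by
  cases m with
  | zero => simp [pvAt]
  | succ m' =>
    simp only [pvAt, List.getD_cons_succ]
    rw [pvPrefixAux_getD S 0 m' (by omega)]
    simp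

theorem pvSum_take_succ (S : List (List Char)) (m : Nat) (hm : m < S.length) :
    ((S.map pvDeltaS).take (m + 1)).sum = ((S.map pvDeltaS).take m).sum + pvDeltaS S[m] := by
  rw [List.take_add_one, List.getElem?_eq_getElem (by simpa using hm)]
  simp

-- The prefix-sum filter over range(ch+1, n) finds the same end index as the depth scan.
theorem pvEnd_bridge (S : List (List Char)) (ch : Nat) (hch : ch ≤ S.length)
    (tail : List (List Char)) (j : Nat) (d : Int)
    (htail : S.drop j = tail)
    (hd : d = ((S.map pvDeltaS).take j).sum - ((S.map pvDeltaS).take ch).sum) :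
    ((PySem.List.pyRange (j : Int) (S.length : Int) 1).filter
        (fun k => decide (pvAt (0 :: pvPrefixAux S 0) (k.toNat + 1) ≤ pvAt (0 :: pvPrefixAux S 0) ch))).head?
      = (pvScanEndS tail j d).map (fun e => (e : Int)) := by
  induction tail generalizing j d with
  | nil =>
    have hj : S.length ≤ j := by
      have hlen := congrArg List.length htail
      simp at hlen
      omega
    have : PySem.List.pyRange (j : Int) (S.length : Int) 1 = [] := by
      simp [PySem.List.pyRange]; omega
    rw [this]
    rfl
  | cons s tail' ih =>
    have hj : j < S.length := by
      by_contra hc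
      rw [List.drop_eq_nil_of_le (by omega)] at htail
      simp at htail
    have hcons : S.drop j = S[j] :: S.drop (j + 1) := List.drop_eq_getElem_cons hj
    rw [htail] at hcons
    have hs : s = S[j] := by
      have h' := congrArg List.head? hcons
      rw [List.head?_cons, List.head?_cons] at h'
      exact Option.some.inj h'
    have htail' : S.drop (j + 1) = tail' := by
      have h' := congrArg List.tail hcons
      simpa using h'.symm
    rw [PySem.List.pyRange_one_cons (by exact_mod_cast hj), List.filter_cons]
    have hat1 : pvAt (0 :: pvPrefixAux S 0) ((j : Int).toNat + 1) = ((S.map pvDeltaS).take (j + 1)).sum := by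
      simp only [Int.toNat_natCast]
      exact pvAt_prefix S (j + 1) (by omega)
    have hatc : pvAt (0 :: pvPrefixAux S 0) ch = ((S.map pvDeltaS).take ch).sum := pvAt_prefix S ch hch
    have hd' : d + pvDeltaS s = ((S.map pvDeltaS).take (j + 1)).sum - ((S.map pvDeltaS).take ch).sum := by
      rw [hd, hs, pvSum_take_succ S j hj]; ring
    by_cases hc : ((S.map pvDeltaS).take (j + 1)).sum ≤ ((S.map pvDeltaS).take ch).sum
    · have : decide (pvAt (0 :: pvPrefixAux S 0) ((j : Int).toNat + 1) ≤ pvAt (0 :: pvPrefixAux S 0) ch) = true := by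
        rw [hat1, hatc]; exact decide_eq_true hc
      rw [if_pos this]
      have hle : d + pvDeltaS s ≤ 0 := by omega
      simp [pvScanEndS, hle]
    · have : ¬ (decide (pvAt (0 :: pvPrefixAux S 0) ((j : Int).toNat + 1) ≤ pvAt (0 :: pvPrefixAux S 0) ch) = true) := by
        rw [hat1, hatc]; simpa using hc
      rw [if_neg this]
      have hgt : ¬ (d + pvDeltaS s ≤ 0) := by omega
      simp only [pvScanEndS, if_neg hgt]
      exact ih (j + 1) (d + pvDeltaS s) htail' hd'

-- ===== VERDICT (by name: the statement is the Claim_ definition above) =====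
theorem find_commented_channel_block_spec : Claim_equal_find_commented_channel_block := by
  intro text _
  unfold Spec_find_commented_channel_block find_commented_channel_block find_commented_channel_block_alt
  rw [pvA_loop_strip]
  set S := (PySem.Chars.splitOn text.toList "\n".toList).map PySem.Chars.strip with hS
  show pvA_loopS S 0 none 0 false =
    (match (pvIdxWhere (fun _ s => pvIsHeaderS s) S 0).head? with
    | none => (none, none)
    | some start =>
      match (pvIdxWhere (fun j s => decide (start < j) && pvIsChannelsS s) S 0).head? with
      | none => (some (start : Int), none)
      | some ch =>
        (some (start : Int),
          ((PySem.List.pyRange ((ch : Int) + 1) (S.length : Int) 1).filter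
            (fun k => decide (pvAt (0 :: pvPrefixAux S 0) (k.toNat + 1) ≤ pvAt (0 :: pvPrefixAux S 0) ch))).head?))
  rw [pvA_phase0, pvIdxWhere_header]
  cases h0 : pvScanHeaderS S 0 with
  | none => rfl
  | some p =>
    obtain ⟨st, rest⟩ := p
    obtain ⟨-, hrest⟩ := pvScanHeaderS_drop S 0 st rest h0
    rw [Nat.sub_zero] at hrest
    simp only [Option.map_some]
    show pvA_loopS rest (st + 1) (some (st : Int)) 0 false = _
    rw [pvA_phase1, pvIdxWhere_guard_skip S st 0 (by omega), Nat.sub_zero, hrest,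
      pvIdxWhere_channels]
    cases h1 : pvScanChannelsS rest (st + 1) with
    | none => rfl
    | some q =>
      obtain ⟨j, l, rest2⟩ := q
      obtain ⟨hj1, hdrop⟩ := pvScanChannelsS_drop rest (st + 1) j l rest2 h1
      have hSdrop : S.drop j = l :: rest2 := by
        have : (S.drop (st + 1)).drop (j - (st + 1)) = S.drop ((st + 1) + (j - (st + 1))) := List.drop_drop
        rw [hrest] at this
        rw [show (st + 1) + (j - (st + 1)) = j by omega] at this
        rw [← this, hdrop]
      have hjlt : j < S.length := by
        by_contra hc
        rw [List.drop_eq_nil_of_le (by omega)] at hSdrop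
        simp at hSdrop
      have hcons2 : l :: rest2 = S[j] :: S.drop (j + 1) := by
        rw [← hSdrop]; exact List.drop_eq_getElem_cons hjlt
      have hl : l = S[j] := by
        have h' := congrArg List.head? hcons2
        rw [List.head?_cons, List.head?_cons] at h'
        exact Option.some.inj h'
      have hrest2 : S.drop (j + 1) = rest2 := by
        have h' := congrArg List.tail hcons2
        simpa using h'.symm
      simp only [Option.map_some]
      show pvA_loopS rest2 (j + 1) (some (st : Int)) (pvDeltaS l) true = _
      rw [pvA_phase2]
      have hdval : pvDeltaS l = ((S.map pvDeltaS).take (j + 1)).sum - ((S.map pvDeltaS).take j).sum := by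
        rw [pvSum_take_succ S j hjlt, hl]; ring
      have hb := pvEnd_bridge S j (by omega) rest2 (j + 1) (pvDeltaS l) hrest2 hdval
      push_cast at hb
      rw [hb]
      cases pvScanEndS rest2 (j + 1) (pvDeltaS l) <;> simp
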